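-- pv_equiv track=rewrite | github.com/litebird/LBxS4 | lbxs4/multitracer.py | tracer_list
-- ===== SOURCE A (Python) =====
-- def tracer_list(add_cmb=['klb','ks4'], add_euc=5, add_lss=5, add_cib=True):
--
--     # construct list of mass tracers to be combined
--     klist = {}
--
--     # store id for cmb lensing maps
--     kid = 0
--     for k in add_cmb:
--         klist[kid] = k
--         kid += 1
--
--     # store id for cib maps
--     if add_cib:
--         klist[kid] = 'cib'
--         kid += 1
--
--     # store id for Euclid galaxy maps
--     for z in range(add_euc):
--         klist[kid] = 'euc'+str(z+1)+'n'+str(add_euc)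
--         kid += 1
--
--     # store id for Euclid galaxy maps
--     for z in range(add_lss):
--         klist[kid] = 'lss'+str(z+1)+'n'+str(add_lss)
--         kid += 1
--
--     return klist
-- ===== SOURCE B (Python) =====
-- def tracer_list(add_cmb=['klb','ks4'], add_euc=5, add_lss=5, add_cib=True):
--     # compute the total number of tracers up front, then decode each label
--     # directly from its id by offset arithmetic (random access, no counter)
--     n_cmb = len(add_cmb)
--     n_cib = 1 if add_cib else 0
--     n_euc = max(add_euc, 0)
--     n_lss = max(add_lss, 0)
--
--     def label(i):
--         if i < n_cmb:
--             return add_cmb[i]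
--         i -= n_cmb
--         if i < n_cib:
--             return 'cib'
--         i -= n_cib
--         if i < n_euc:
--             return 'euc' + str(i + 1) + 'n' + str(add_euc)
--         i -= n_euc
--         return 'lss' + str(i + 1) + 'n' + str(add_lss)
--
--     return {i: label(i) for i in range(n_cmb + n_cib + n_euc + n_lss)}
-- ===== Notes on version B (the rewrite author's own statement) =====
-- stated objective: alternative
-- what changed: B computes the total tracer count up front and decodes each label directly from its id by offset arithmetic (random-access {i: label(i) for i in range(total)}), instead of A's sequential generation threading a mutable kid counter through four insertion loops.
import Mathlib
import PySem

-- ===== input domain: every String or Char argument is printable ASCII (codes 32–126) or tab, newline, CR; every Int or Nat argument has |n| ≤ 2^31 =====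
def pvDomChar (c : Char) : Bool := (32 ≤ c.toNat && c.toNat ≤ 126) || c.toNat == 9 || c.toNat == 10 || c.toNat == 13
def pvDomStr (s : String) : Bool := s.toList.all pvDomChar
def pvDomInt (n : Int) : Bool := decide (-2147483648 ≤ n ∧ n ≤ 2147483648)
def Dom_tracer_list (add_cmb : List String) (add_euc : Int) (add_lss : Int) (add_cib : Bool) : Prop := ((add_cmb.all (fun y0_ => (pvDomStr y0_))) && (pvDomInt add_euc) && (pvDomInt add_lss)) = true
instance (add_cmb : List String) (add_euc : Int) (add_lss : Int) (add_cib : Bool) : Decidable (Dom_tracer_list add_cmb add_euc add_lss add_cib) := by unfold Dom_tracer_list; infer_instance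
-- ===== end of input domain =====

-- B replaces A's sequential dict-building with a mutable kid counter by computing the total
-- tracer count up front and DECODING each label directly from its id by offset arithmetic
-- (random-access decode instead of sequential generation; objective: alternative).

-- ===== PORT A =====
def tracer_list (add_cmb : List String) (add_euc : Int) (add_lss : Int) (add_cib : Bool) : List (Int × String) :=
  -- klist = {}; kid = 0; four counter-threading insertion loops, in A's order
  let st0 : PySem.Dict Int String × Int := (PySem.Dict.empty, 0)
  let st1 := add_cmb.foldl (fun st k => (st.1.insert st.2 k, st.2 + 1)) st0
  let st2 := if add_cib then (st1.1.insert st1.2 "cib", st1.2 + 1) else st1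
  let st3 := (PySem.List.pyRange 0 add_euc 1).foldl
    (fun st z => (st.1.insert st.2 ("euc" ++ PySem.Int.toStr (z + 1) ++ "n" ++ PySem.Int.toStr add_euc), st.2 + 1)) st2
  let st4 := (PySem.List.pyRange 0 add_lss 1).foldl
    (fun st z => (st.1.insert st.2 ("lss" ++ PySem.Int.toStr (z + 1) ++ "n" ++ PySem.Int.toStr add_lss), st.2 + 1)) st3
  st4.1.items

-- ===== PORT B =====
-- B's inner 'label(i)': decode the label of tracer id i by offset arithmetic.
-- Python's sequential 'i -= …' rebindings are written as explicit subtractions;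
-- 'add_cmb[i]' is pyGet? (B only calls label with 0 ≤ i < len, where it is some).
def pvLabel (add_cmb : List String) (add_euc : Int) (add_lss : Int) (add_cib : Bool) (i : Int) : String :=
  let ncmb : Int := (add_cmb.length : Int)
  let ncib : Int := if add_cib then (1 : Int) else 0
  let neuc : Int := max add_euc 0
  if i < ncmb then (PySem.List.pyGet? add_cmb i).getD ""
  else if i - ncmb < ncib then "cib"
  else if i - ncmb - ncib < neuc then
    "euc" ++ PySem.Int.toStr (i - ncmb - ncib + 1) ++ "n" ++ PySem.Int.toStr add_euc
  else
    "lss" ++ PySem.Int.toStr (i - ncmb - ncib - neuc + 1) ++ "n" ++ PySem.Int.toStr add_lss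

def tracer_list_alt (add_cmb : List String) (add_euc : Int) (add_lss : Int) (add_cib : Bool) : List (Int × String) :=
  -- total count up front, then one dict comprehension {i: label(i) for i in range(total)}
  let ncmb : Int := (add_cmb.length : Int)
  let ncib : Int := if add_cib then (1 : Int) else 0
  let neuc : Int := max add_euc 0
  let nlss : Int := max add_lss 0
  ((PySem.List.pyRange 0 (ncmb + ncib + neuc + nlss) 1).foldl
      (fun d i => d.insert i (pvLabel add_cmb add_euc add_lss add_cib i))
      PySem.Dict.empty).items

-- ===== PRECONDITION & SPEC =====
def Spec_tracer_list (add_cmb : List String) (add_euc : Int) (add_lss : Int) (add_cib : Bool) (out : List (Int × String)) : Prop := out = tracer_list_alt add_cmb add_euc add_lss add_cib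
instance (add_cmb : List String) (add_euc : Int) (add_lss : Int) (add_cib : Bool) (out : List (Int × String)) : Decidable (Spec_tracer_list add_cmb add_euc add_lss add_cib out) := by unfold Spec_tracer_list; infer_instance

-- ===== CLAIM (what is proved, stated in full; the proofs are below) =====
def Claim_equal_tracer_list : Prop := ∀ (add_cmb : List String) (add_euc : Int) (add_lss : Int) (add_cib : Bool), Dom_tracer_list add_cmb add_euc add_lss add_cib → Spec_tracer_list add_cmb add_euc add_lss add_cib (tracer_list add_cmb add_euc add_lss add_cib)

-- ===== LEMMAS AND PROOFS =====

-- a counter-threading insertion loop over fresh increasing keys appends enumerate of the labels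
theorem pv_fold_insert_enum {α : Type} (g : α → String) (xs : List α) (d : PySem.Dict Int String) (n : Int)
    (hd : ∀ k, d.contains k = true → k < n) :
    xs.foldl (fun (st : PySem.Dict Int String × Int) y => (st.1.insert st.2 (g y), st.2 + 1)) (d, n)
      = (PySem.Dict.mk (d.items ++ PySem.List.enumerate (xs.map g) n), n + xs.length) := by
  induction xs generalizing d n with
  | nil => simp
  | cons x xs ih =>
      have hnotc : d.contains n = false := by
        by_contra h
        have := hd n (by simpa using h)
        omega
      have hd' : ∀ k, (d.insert n (g x)).contains k = true → k < n + 1 := by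
        intro k hk
        rw [PySem.Dict.contains_insert] at hk
        rcases Bool.or_eq_true_iff.mp hk with h | h
        · have : k = n := by simpa using h
          omega
        · have := hd k h
          omega
      simp only [List.foldl_cons]
      rw [ih (d.insert n (g x)) (n + 1) hd']
      rw [PySem.Dict.items_insert_of_not_contains _ _ hnotc]
      simp [PySem.List.enumerate_cons]
      omega

-- keys of such an accumulated dict are all below the counter
theorem pv_contains_mk_enum_lt (labels : List String) (k : Int)
    (h : (PySem.Dict.mk (PySem.List.enumerate labels 0)).contains k = true) :
    k < (labels.length : Int) := by
  rw [PySem.Dict.contains_iff_mem_keys] at h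
  simp only [PySem.Dict.keys] at h
  rw [PySem.List.map_fst_enumerate] at h
  rw [PySem.List.mem_pyRange_one] at h
  omega

-- A's result is enumerate of the concatenated label blocks
theorem pv_tracer_list_eq_enumerate (add_cmb : List String) (add_euc : Int) (add_lss : Int) (add_cib : Bool) :
    tracer_list add_cmb add_euc add_lss add_cib
      = PySem.List.enumerate
          (add_cmb
            ++ ((if add_cib then ["cib"] else [])
            ++ ((PySem.List.pyRange 0 add_euc 1).map (fun z => "euc" ++ PySem.Int.toStr (z + 1) ++ "n" ++ PySem.Int.toStr add_euc)
            ++ (PySem.List.pyRange 0 add_lss 1).map (fun z => "lss" ++ PySem.Int.toStr (z + 1) ++ "n" ++ PySem.Int.toStr add_lss)))) 0 := by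
  unfold tracer_list
  dsimp only
  -- stage 1: the add_cmb loop (g = id)
  have h1 := pv_fold_insert_enum (fun s : String => s) add_cmb PySem.Dict.empty 0
    (by intro k hk; simp [PySem.Dict.contains_empty] at hk)
  simp only [List.map_id_fun', id] at h1
  rw [show (fun (st : PySem.Dict Int String × Int) k => (st.1.insert st.2 k, st.2 + 1))
        = (fun (st : PySem.Dict Int String × Int) y => (st.1.insert st.2 ((fun s : String => s) y), st.2 + 1)) from rfl] at *
  rw [h1]
  simp only [show PySem.Dict.empty.items = [] from rfl, List.nil_append]
  -- stage 2: the cib branch, as a one-element (or empty) labels block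
  set L1 : List String := add_cmb with hL1
  set L2 : List String := if add_cib then ["cib"] else [] with hL2
  have h2 : (if add_cib then
        ((PySem.Dict.mk (PySem.List.enumerate L1 0)).insert ((0 : Int) + (L1.length : Int)) "cib",
          (0 : Int) + (L1.length : Int) + 1)
      else (PySem.Dict.mk (PySem.List.enumerate L1 0), (0 : Int) + (L1.length : Int)))
      = (PySem.Dict.mk (PySem.List.enumerate (L1 ++ L2) 0), (0 : Int) + ((L1 ++ L2).length : Int)) := by
    cases add_cib with
    | false => simp [hL2]
    | true =>
        simp only [hL2, if_pos]
        have hnc : (PySem.Dict.mk (PySem.List.enumerate L1 0)).contains ((0 : Int) + (L1.length : Int)) = false := by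
          by_contra h
          have := pv_contains_mk_enum_lt L1 _ (by simpa using h)
          omega
        apply Prod.ext
        · apply PySem.Dict.ext
          rw [PySem.Dict.items_insert_of_not_contains _ _ hnc]
          simp [PySem.List.enumerate_append, PySem.List.enumerate_cons, PySem.List.enumerate_nil]
        · simp
  rw [h2]
  -- stage 3: the euc loop
  have hc2 : ∀ k, (PySem.Dict.mk (PySem.List.enumerate (L1 ++ L2) 0)).contains k = true →
      k < (0 : Int) + ((L1 ++ L2).length : Int) := by
    intro k hk
    have := pv_contains_mk_enum_lt (L1 ++ L2) k hk
    omega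
  rw [pv_fold_insert_enum _ _ _ _ hc2]
  set L3 : List String := (PySem.List.pyRange 0 add_euc 1).map
    (fun z => "euc" ++ PySem.Int.toStr (z + 1) ++ "n" ++ PySem.Int.toStr add_euc) with hL3
  have e3 : PySem.List.enumerate (L1 ++ L2) 0 ++
        PySem.List.enumerate L3 (0 + ((L1 ++ L2).length : Int))
      = PySem.List.enumerate ((L1 ++ L2) ++ L3) 0 := by
    conv_rhs => rw [PySem.List.enumerate_append]
  rw [e3]
  -- stage 4: the lss loop
  have hc3 : ∀ k, (PySem.Dict.mk (PySem.List.enumerate ((L1 ++ L2) ++ L3) 0)).contains k = true →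
      k < 0 + ((L1 ++ L2).length : Int) + (PySem.List.pyRange 0 add_euc 1).length := by
    intro k hk
    have := pv_contains_mk_enum_lt ((L1 ++ L2) ++ L3) k hk
    simp only [hL3, List.length_append, List.length_map] at this ⊢
    push_cast at this ⊢
    omega
  rw [pv_fold_insert_enum _ _ _ _ hc3]
  set L4 : List String := (PySem.List.pyRange 0 add_lss 1).map
    (fun z => "lss" ++ PySem.Int.toStr (z + 1) ++ "n" ++ PySem.Int.toStr add_lss) with hL4
  have e4 : PySem.List.enumerate ((L1 ++ L2) ++ L3) 0 ++
        PySem.List.enumerate L4 (0 + ((L1 ++ L2).length : Int) + (PySem.List.pyRange 0 add_euc 1).length)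
      = PySem.List.enumerate (((L1 ++ L2) ++ L3) ++ L4) 0 := by
    conv_rhs => rw [PySem.List.enumerate_append]
    congr 2
    simp only [hL3, List.length_append, List.length_map]
    push_cast; ring
  rw [e4]
  simp [List.append_assoc]

-- B's result is the id-to-decoded-label table over range(total)
theorem pv_tracer_list_alt_eq_map (add_cmb : List String) (add_euc : Int) (add_lss : Int) (add_cib : Bool) :
    tracer_list_alt add_cmb add_euc add_lss add_cib
      = (PySem.List.pyRange 0 ((add_cmb.length : Int) + (if add_cib then (1 : Int) else 0) + max add_euc 0 + max add_lss 0) 1).map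
          (fun i => (i, pvLabel add_cmb add_euc add_lss add_cib i)) := by
  unfold tracer_list_alt
  dsimp only
  rw [show (fun (d : PySem.Dict Int String) (i : Int) => d.insert i (pvLabel add_cmb add_euc add_lss add_cib i))
        = (fun (d : PySem.Dict Int String) (a : Int) => d.insert ((fun (i : Int) => i) a) ((fun (i : Int) => pvLabel add_cmb add_euc add_lss add_cib i) a)) from rfl]
  rw [PySem.Dict.items_foldl_insert_fresh _ (fun (i : Int) => i)
      (fun (i : Int) => pvLabel add_cmb add_euc add_lss add_cib i) PySem.Dict.empty
      (by intro a _; simp [PySem.Dict.contains_empty])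
      (by simpa using PySem.List.nodup_pyRange_one 0 _)]
  simp [show (PySem.Dict.empty : PySem.Dict Int String).items = [] from rfl]

-- the decoded label at id k is the k-th concatenated label
theorem pv_label_getElem? (add_cmb : List String) (add_euc : Int) (add_lss : Int) (add_cib : Bool)
    (k : Nat)
    (hk : k < (add_cmb
      ++ ((if add_cib then ["cib"] else [])
      ++ ((PySem.List.pyRange 0 add_euc 1).map (fun z => "euc" ++ PySem.Int.toStr (z + 1) ++ "n" ++ PySem.Int.toStr add_euc)
      ++ (PySem.List.pyRange 0 add_lss 1).map (fun z => "lss" ++ PySem.Int.toStr (z + 1) ++ "n" ++ PySem.Int.toStr add_lss)))).length) :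
    (add_cmb
      ++ ((if add_cib then ["cib"] else [])
      ++ ((PySem.List.pyRange 0 add_euc 1).map (fun z => "euc" ++ PySem.Int.toStr (z + 1) ++ "n" ++ PySem.Int.toStr add_euc)
      ++ (PySem.List.pyRange 0 add_lss 1).map (fun z => "lss" ++ PySem.Int.toStr (z + 1) ++ "n" ++ PySem.Int.toStr add_lss))))[k]?
      = some (pvLabel add_cmb add_euc add_lss add_cib (k : Int)) := by
  have hlen3 : ((PySem.List.pyRange 0 add_euc 1).map
      (fun z => "euc" ++ PySem.Int.toStr (z + 1) ++ "n" ++ PySem.Int.toStr add_euc)).length = add_euc.toNat := by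
    simp [PySem.List.length_pyRange_one]
  have hlen4 : ((PySem.List.pyRange 0 add_lss 1).map
      (fun z => "lss" ++ PySem.Int.toStr (z + 1) ++ "n" ++ PySem.Int.toStr add_lss)).length = add_lss.toNat := by
    simp [PySem.List.length_pyRange_one]
  unfold pvLabel
  simp only [List.length_append, List.length_map, PySem.List.length_pyRange_one] at hk
  cases add_cib with
  | false =>
      simp only [Bool.false_eq_true, if_false, List.nil_append, List.length_nil] at hk ⊢
      by_cases h1 : k < add_cmb.length
      · rw [List.getElem?_append_left h1, if_pos (by exact_mod_cast h1)]
        simp [List.getElem?_eq_getElem h1]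
      · rw [List.getElem?_append_right (le_of_not_gt h1),
            if_neg (by omega),
            if_neg (by omega)]
        by_cases h3 : k - add_cmb.length < add_euc.toNat
        · rw [List.getElem?_append_left (by simp only [hlen3]; omega : k - add_cmb.length < _)]
          rw [List.getElem?_map, PySem.List.getElem?_pyRange_one]
          rw [if_pos (by omega : k - add_cmb.length < (add_euc - 0).toNat)]
          rw [if_pos (by omega : (k : Int) - (add_cmb.length : Int) - 0 < max add_euc 0)]
          have harg : (0 : Int) + ((k - add_cmb.length : Nat) : Int) + 1
              = (k : Int) - (add_cmb.length : Int) - 0 + 1 := by omega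
          rw [Option.map_some, harg]
        · rw [List.getElem?_append_right (by omega : _ ≤ k - add_cmb.length)]
          rw [List.getElem?_map, PySem.List.getElem?_pyRange_one, hlen3]
          rw [if_pos (by omega : k - add_cmb.length - add_euc.toNat < (add_lss - 0).toNat)]
          rw [if_neg (by omega : ¬((k : Int) - (add_cmb.length : Int) - 0 < max add_euc 0))]
          have harg : (0 : Int) + ((k - add_cmb.length - add_euc.toNat : Nat) : Int) + 1
              = (k : Int) - (add_cmb.length : Int) - 0 - max add_euc 0 + 1 := by omega
          rw [Option.map_some, harg]
  | true =>
      simp only [if_true, List.length_cons, List.length_nil] at hk ⊢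
      by_cases h1 : k < add_cmb.length
      · rw [List.getElem?_append_left h1, if_pos (by exact_mod_cast h1)]
        simp [List.getElem?_eq_getElem h1]
      · rw [List.getElem?_append_right (le_of_not_gt h1), if_neg (by omega)]
        by_cases h2 : k - add_cmb.length < 1
        · rw [List.getElem?_append_left (by simp; omega), if_pos (by omega)]
          have : k - add_cmb.length = 0 := by omega
          simp [this]
        · rw [List.getElem?_append_right (by simp; omega), if_neg (by omega)]
          simp only [List.length_cons, List.length_nil]
          by_cases h3 : k - add_cmb.length - 1 < add_euc.toNat
          · rw [List.getElem?_append_left (by simp only [hlen3]; omega : k - add_cmb.length - 1 < _)]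
            rw [List.getElem?_map, PySem.List.getElem?_pyRange_one]
            rw [if_pos (by omega : k - add_cmb.length - 1 < (add_euc - 0).toNat)]
            rw [if_pos (by omega : (k : Int) - (add_cmb.length : Int) - 1 < max add_euc 0)]
            have harg : (0 : Int) + ((k - add_cmb.length - 1 : Nat) : Int) + 1
                = (k : Int) - (add_cmb.length : Int) - 1 + 1 := by omega
            rw [Option.map_some, harg]
          · rw [List.getElem?_append_right (by omega : _ ≤ k - add_cmb.length - 1)]
            rw [List.getElem?_map, PySem.List.getElem?_pyRange_one, hlen3]
            rw [if_pos (by omega : k - add_cmb.length - 1 - add_euc.toNat < (add_lss - 0).toNat)]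
            rw [if_neg (by omega : ¬((k : Int) - (add_cmb.length : Int) - 1 < max add_euc 0))]
            have harg : (0 : Int) + ((k - add_cmb.length - 1 - add_euc.toNat : Nat) : Int) + 1
                = (k : Int) - (add_cmb.length : Int) - 1 - max add_euc 0 + 1 := by omega
            rw [Option.map_some, harg]

theorem tracer_list_eq (add_cmb : List String) (add_euc : Int) (add_lss : Int) (add_cib : Bool) :
    tracer_list add_cmb add_euc add_lss add_cib = tracer_list_alt add_cmb add_euc add_lss add_cib := by
  rw [pv_tracer_list_eq_enumerate, pv_tracer_list_alt_eq_map]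
  set labels : List String := add_cmb
    ++ ((if add_cib then ["cib"] else [])
    ++ ((PySem.List.pyRange 0 add_euc 1).map (fun z => "euc" ++ PySem.Int.toStr (z + 1) ++ "n" ++ PySem.Int.toStr add_euc)
    ++ (PySem.List.pyRange 0 add_lss 1).map (fun z => "lss" ++ PySem.Int.toStr (z + 1) ++ "n" ++ PySem.Int.toStr add_lss))) with hlab
  have hlen : labels.length
      = ((add_cmb.length : Int) + (if add_cib then (1 : Int) else 0) + max add_euc 0 + max add_lss 0 - 0).toNat := by
    rw [hlab]
    simp only [List.length_append, List.length_map, PySem.List.length_pyRange_one]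
    cases add_cib <;> simp <;> omega
  apply List.ext_getElem
  · simp [hlen, PySem.List.length_pyRange_one]
  · intro k hk1 hk2
    rw [PySem.List.getElem_enumerate]
    rw [List.getElem_map]
    rw [PySem.List.getElem_pyRange_one]
    rw [PySem.List.length_enumerate] at hk1
    have h := pv_label_getElem? add_cmb add_euc add_lss add_cib k (by rw [← hlab]; exact hk1)
    rw [← hlab] at h
    have h2 : labels[k] = pvLabel add_cmb add_euc add_lss add_cib (k : Int) := by
      have := List.getElem?_eq_getElem hk1
      rw [this] at h
      exact Option.some.inj h
    rw [h2]
    norm_num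

-- ===== VERDICT (by name: the statement is the Claim_ definition above) =====
theorem tracer_list_spec : Claim_equal_tracer_list := by
  intro add_cmb add_euc add_lss add_cib _
  exact tracer_list_eq add_cmb add_euc add_lss add_cib
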